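-- pv_equiv track=rewrite | github.com/GavinPHR/code | test.py | isMedian
-- ===== SOURCE A (Python) =====
-- import math
--
-- def isMedian(A, c):
--     hi = 0
--     lo = 0
--     for i in A:
--         if i >= c:
--             hi += 1
--         if i <= c:
--             lo += 1
--     if hi >= math.ceil(len(A) / 2) and lo >= len(A) // 2:
--         return True
--     return False
-- ===== SOURCE B (Python) =====
-- def isMedian(A, c):
--     S = sorted(A)
--     n = len(A)
--     if n == 0:
--         return True
--     if not (c <= S[n // 2]):
--         return False
--     if n // 2 >= 1 and not (S[n // 2 - 1] <= c):
--         return False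
--     return True
-- ===== Notes on version B (the rewrite author's own statement) =====
-- stated objective: alternative
-- what changed: Replaced A's two-counter counting pass plus count thresholds by a sort-then-index order-statistic check: c <= sorted(A)[n//2] and (when n//2 >= 1) sorted(A)[n//2-1] <= c.
import Mathlib
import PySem

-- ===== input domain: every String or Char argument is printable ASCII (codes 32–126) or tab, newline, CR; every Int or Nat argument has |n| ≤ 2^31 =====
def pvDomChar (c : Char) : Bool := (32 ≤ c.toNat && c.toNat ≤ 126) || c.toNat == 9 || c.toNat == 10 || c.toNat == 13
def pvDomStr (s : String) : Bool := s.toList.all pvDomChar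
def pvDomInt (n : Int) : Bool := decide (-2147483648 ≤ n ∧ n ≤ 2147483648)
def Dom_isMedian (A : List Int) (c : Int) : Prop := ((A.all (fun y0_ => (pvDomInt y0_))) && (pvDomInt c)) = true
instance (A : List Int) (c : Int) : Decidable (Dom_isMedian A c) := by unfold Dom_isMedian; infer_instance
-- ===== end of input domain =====

-- B replaces A's two-counter counting pass by sort-then-index order-statistic checks (alternative decomposition, not faster).

-- ===== PORT A =====
-- math.ceil(len(A) / 2) is exact on the domain's sizes and equals (len(A) + 1) // 2.
def isMedian (A : List Int) (c : Int) : Bool :=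
  let hilo : Int × Int := A.foldl (fun p i =>
    ((if i ≥ c then p.1 + 1 else p.1), (if i ≤ c then p.2 + 1 else p.2))) (0, 0)
  if hilo.1 ≥ PySem.Int.floordiv ((A.length : Int) + 1) 2 ∧
     hilo.2 ≥ PySem.Int.floordiv (A.length : Int) 2 then true else false

-- ===== PORT B =====
-- S[n//2] and S[n//2-1]: both indices are provably in range (0 ≤ index < n), so the
-- pyGet? result is always `some` and the `.getD 0` default is never used.
def isMedian_alt (A : List Int) (c : Int) : Bool :=
  let S := PySem.List.sorted A (fun x => x) false
  let n : Int := A.length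
  if n = 0 then true
  else if ¬ (c ≤ (PySem.List.pyGet? S (PySem.Int.floordiv n 2)).getD 0) then false
  else if PySem.Int.floordiv n 2 ≥ 1 ∧
          ¬ ((PySem.List.pyGet? S (PySem.Int.floordiv n 2 - 1)).getD 0 ≤ c) then false
  else true

-- ===== PRECONDITION & SPEC =====
def Spec_isMedian (A : List Int) (c : Int) (out : Bool) : Prop := out = isMedian_alt A c
instance (A : List Int) (c : Int) (out : Bool) : Decidable (Spec_isMedian A c out) := by unfold Spec_isMedian; infer_instance

-- ===== CLAIM (what is proved, stated in full; the proofs are below) =====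
def Claim_equal_isMedian : Prop := ∀ (A : List Int) (c : Int), Dom_isMedian A c → Spec_isMedian A c (isMedian A c)

-- ===== LEMMAS AND PROOFS =====

-- A's fold computes the two counts.
theorem foldl_hilo (A : List Int) (c : Int) (a b : Int) :
    A.foldl (fun (p : Int × Int) i =>
      ((if i ≥ c then p.1 + 1 else p.1), (if i ≤ c then p.2 + 1 else p.2))) (a, b)
    = (a + (A.countP (fun i => decide (i ≥ c)) : Int),
       b + (A.countP (fun i => decide (i ≤ c)) : Int)) := by
  induction A generalizing a b with
  | nil => simp
  | cons x t ih =>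
    simp only [List.foldl_cons, List.countP_cons, ih]
    by_cases h1 : x ≥ c <;> by_cases h2 : x ≤ c <;>
      simp [h1, h2, Prod.ext_iff] <;> push_cast <;> omega

-- In a ≤-sorted list, L[i] ≤ c iff i is below the count of elements ≤ c.
theorem sorted_le_iff (c : Int) (L : List Int) :
    L.Pairwise (fun a b : Int => a ≤ b) →
    ∀ i, (hi : i < L.length) → (L[i] ≤ c ↔ i < L.countP (fun x => decide (x ≤ c))) := by
  induction L with
  | nil => intro _ i hi; simp at hi
  | cons x t ih =>
    intro hL i hi
    rw [List.pairwise_cons] at hL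
    obtain ⟨hx, ht⟩ := hL
    by_cases hxc : x ≤ c
    · cases i with
      | zero => simpa [List.countP_cons, hxc] using Nat.succ_pos _
      | succ j =>
        have hj : j < t.length := by simpa using hi
        simpa [List.countP_cons, hxc, Nat.succ_lt_succ_iff] using ih ht j hj
    · have hall : t.countP (fun x => decide (x ≤ c)) = 0 := by
        rw [List.countP_eq_zero]
        intro y hy
        have := hx y hy
        simp only [decide_eq_true_eq]
        omega
      cases i with
      | zero => simp [List.countP_cons, hxc, hall]
      | succ j =>
        have hj : j < t.length := by simpa using hi
        have hyc : ¬ t[j] ≤ c := by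
          have := hx t[j] (List.getElem_mem hj)
          omega
        simp [List.countP_cons, hxc, hall, hyc]

-- In a ≤-sorted list, c ≤ L[i] iff the count of elements < c is at most i.
theorem sorted_ge_iff (c : Int) (L : List Int) :
    L.Pairwise (fun a b : Int => a ≤ b) →
    ∀ i, (hi : i < L.length) → (c ≤ L[i] ↔ L.countP (fun x => decide (x < c)) ≤ i) := by
  induction L with
  | nil => intro _ i hi; simp at hi
  | cons x t ih =>
    intro hL i hi
    rw [List.pairwise_cons] at hL
    obtain ⟨hx, ht⟩ := hL
    by_cases hxc : x < c
    · cases i with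
      | zero =>
        have h1 : 0 < (x :: t).countP (fun x => decide (x < c)) := by
          simp [List.countP_cons, hxc]
        simp only [List.getElem_cons_zero]
        constructor
        · intro h; omega
        · intro h; omega
      | succ j =>
        have hj : j < t.length := by simpa using hi
        simpa [List.countP_cons, hxc, Nat.succ_le_succ_iff] using ih ht j hj
    · have hall : t.countP (fun x => decide (x < c)) = 0 := by
        rw [List.countP_eq_zero]
        intro y hy
        have := hx y hy
        simp only [decide_eq_true_eq]
        omega
      have hle : c ≤ (x :: t)[i] := by
        cases i with
        | zero => simp only [List.getElem_cons_zero]; omega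
        | succ j =>
          have hj : j < t.length := by simpa using hi
          have h2 := hx t[j] (List.getElem_mem hj)
          simp only [List.getElem_cons_succ]
          omega
      simp [List.countP_cons, hxc, hall, hle]

-- complementary counts: #{≥ c} + #{< c} = length
theorem count_ge_add_lt (A : List Int) (c : Int) :
    A.countP (fun i => decide (i ≥ c)) + A.countP (fun x => decide (x < c)) = A.length := by
  induction A with
  | nil => rfl
  | cons x t ih =>
    rw [List.countP_cons, List.countP_cons, List.length_cons]
    by_cases h : x ≥ c
    · rw [if_pos (by simpa using h), if_neg (by simpa using (show ¬ x < c by omega))]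
      omega
    · rw [if_neg (by simpa using h), if_pos (by simpa using (show x < c by omega))]
      omega

theorem isMedian_true_iff (A : List Int) (c : Int) :
    isMedian A c = true ↔
      ((A.countP (fun i => decide (i ≥ c)) : Int) ≥ PySem.Int.floordiv ((A.length : Int) + 1) 2 ∧
       (A.countP (fun i => decide (i ≤ c)) : Int) ≥ PySem.Int.floordiv (A.length : Int) 2) := by
  unfold isMedian
  simp only [foldl_hilo, zero_add]
  split_ifs with h
  · exact iff_of_true rfl h
  · exact iff_of_false (by simp) h

theorem isMedian_alt_true_iff (A : List Int) (c : Int) (hn : A.length ≠ 0) :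
    isMedian_alt A c = true ↔
      (c ≤ (PySem.List.pyGet? (PySem.List.sorted A (fun x => x) false)
              (PySem.Int.floordiv (A.length : Int) 2)).getD 0 ∧
       ¬ (PySem.Int.floordiv (A.length : Int) 2 ≥ 1 ∧
          ¬ ((PySem.List.pyGet? (PySem.List.sorted A (fun x => x) false)
                (PySem.Int.floordiv (A.length : Int) 2 - 1)).getD 0 ≤ c))) := by
  unfold isMedian_alt
  have h0 : ¬ ((A.length : Int) = 0) := by exact_mod_cast hn
  simp only [h0, if_false]
  split_ifs with h1 h2 <;> simp_all

-- ===== VERDICT (by name: the statement is the Claim_ definition above) =====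
theorem isMedian_spec : Claim_equal_isMedian := by
  intro A c _
  unfold Spec_isMedian
  by_cases hA : A.length = 0
  · have : A = [] := List.length_eq_zero_iff.mp hA
    subst this
    simp [isMedian, isMedian_alt, PySem.Int.floordiv]
  · have hn : 0 < A.length := Nat.pos_of_ne_zero hA
    have hperm : (PySem.List.sorted A (fun x => x) false).Perm A :=
      PySem.List.sorted_perm A (fun x => x) false
    have hlen : (PySem.List.sorted A (fun x => x) false).length = A.length := hperm.length_eq
    have hpair : (PySem.List.sorted A (fun x => x) false).Pairwise (fun a b : Int => a ≤ b) := by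
      simpa using PySem.List.sorted_pairwise (xs := A) (key := fun x => x)
    have hfd1 : PySem.Int.floordiv ((A.length : Int) + 1) 2 = (((A.length + 1) / 2 : Nat) : Int) := by
      have := PySem.Int.floordiv_natCast (A.length + 1) 2
      simpa using this
    have hfd2 : PySem.Int.floordiv (A.length : Int) 2 = ((A.length / 2 : Nat) : Int) :=
      PySem.Int.floordiv_natCast A.length 2
    have hk : A.length / 2 < (PySem.List.sorted A (fun x => x) false).length := by omega
    have hget1 : (PySem.List.pyGet? (PySem.List.sorted A (fun x => x) false)
        (PySem.Int.floordiv (A.length : Int) 2)).getD 0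
        = (PySem.List.sorted A (fun x => x) false)[A.length / 2] := by
      rw [hfd2, PySem.List.pyGet?_natCast]
      simp [List.getElem?_eq_getElem hk]
    have hcnt1 : ((A.countP (fun i => decide (i ≥ c)) : Int)
          ≥ PySem.Int.floordiv ((A.length : Int) + 1) 2)
        ↔ c ≤ (PySem.List.sorted A (fun x => x) false)[A.length / 2] := by
      rw [hfd1, sorted_ge_iff c _ hpair (A.length / 2) hk, hperm.countP_eq]
      have := count_ge_add_lt A c
      constructor
      · intro h; omega
      · intro h; omega
    have hcnt2 : ((A.countP (fun i => decide (i ≤ c)) : Int)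
          ≥ PySem.Int.floordiv (A.length : Int) 2)
        ↔ ¬ (PySem.Int.floordiv (A.length : Int) 2 ≥ 1 ∧
             ¬ ((PySem.List.pyGet? (PySem.List.sorted A (fun x => x) false)
                   (PySem.Int.floordiv (A.length : Int) 2 - 1)).getD 0 ≤ c)) := by
      by_cases hz : A.length / 2 = 0
      · rw [hfd2, hz]
        simp
      · have hk2 : A.length / 2 - 1 < (PySem.List.sorted A (fun x => x) false).length := by omega
        have hget2 : (PySem.List.pyGet? (PySem.List.sorted A (fun x => x) false)
            (PySem.Int.floordiv (A.length : Int) 2 - 1)).getD 0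
            = (PySem.List.sorted A (fun x => x) false)[A.length / 2 - 1] := by
          rw [hfd2]
          have hcast : ((A.length / 2 : Nat) : Int) - 1 = ((A.length / 2 - 1 : Nat) : Int) := by
            omega
          rw [hcast, PySem.List.pyGet?_natCast]
          simp [List.getElem?_eq_getElem hk2]
        rw [hget2, hfd2,
          sorted_le_iff c _ hpair (A.length / 2 - 1) hk2, hperm.countP_eq]
        constructor
        · intro h hcon; omega
        · intro h
          by_cases hle : A.length / 2 - 1 < A.countP (fun x => decide (x ≤ c))
          · omega
          · exfalso; exact h ⟨by omega, by omega⟩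
    rw [Bool.eq_iff_iff, isMedian_true_iff, isMedian_alt_true_iff A c hA, hcnt1, hcnt2, hget1]
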